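-- pv_equiv track=rewrite | github.com/g1tsys/coding | Day 1/544-get_min_colors.py | get_min_colors
-- ===== SOURCE A (Python) =====
-- def get_min_colors(nums):
--     N = len(nums)
--     is_divisible = [False] * N  # 用于记录每个数是否能被其他数整除
--     color_count = 0  # 记录需要的颜色种数
--
--     # 检查每个数是否能被其他数整除
--     for i in range(N):
--         for j in range(i + 1, N):
--             if nums[j] % nums[i] == 0:
--                 is_divisible[j] = True
--             elif nums[i] % nums[j] == 0:
--                 is_divisible[i] = True
--
--     # 统计不需要被其他数整除的数的个数
--     for i in range(N):
--         if not is_divisible[i]: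
--             color_count += 1
--
--     return color_count
-- ===== SOURCE B (Python) =====
-- def get_min_colors(nums):
--     vals = {abs(x) for x in nums}
--     seen = set()
--     count = 0
--     for x in nums:
--         a = abs(x)
--         if a in seen:
--             continue
--         seen.add(a)
--         if not any(d and d != a and a % d == 0 for d in vals):
--             count += 1
--     return count
-- ===== Notes on version B (the rewrite author's own statement) =====
-- stated objective: alternative
-- what changed: A marks elements via an O(N^2) index-pair loop mutating a boolean array; B makes one pass with a seen-set of absolute values and tests each first occurrence for a proper divisor among the distinct absolute values, skipping duplicate absolute values entirely.
import Mathlib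
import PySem

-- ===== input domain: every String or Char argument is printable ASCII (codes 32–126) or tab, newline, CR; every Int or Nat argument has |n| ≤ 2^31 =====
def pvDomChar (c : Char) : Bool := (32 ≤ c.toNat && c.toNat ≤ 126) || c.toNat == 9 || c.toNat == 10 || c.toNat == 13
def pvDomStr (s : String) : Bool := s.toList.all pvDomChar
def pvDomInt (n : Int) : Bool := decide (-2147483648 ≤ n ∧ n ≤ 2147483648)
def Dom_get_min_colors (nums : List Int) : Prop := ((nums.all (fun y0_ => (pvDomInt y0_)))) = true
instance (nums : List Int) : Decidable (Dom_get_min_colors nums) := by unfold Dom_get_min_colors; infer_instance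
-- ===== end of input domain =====

-- B replaces A's quadratic index-pair marking array by a single pass over the list with a
-- seen-set of absolute values and a divisibility test against the distinct-absolute-value set
-- (objective: alternative; equal return value proved on Pre_).

-- ===== PORT A =====
def get_min_colors (nums : List Int) : Int :=
  let N : Int := nums.length
  let is_divisible : List Bool := List.replicate nums.length false
  let is_divisible := (PySem.List.pyRange 0 N 1).foldl (fun arr i =>
    (PySem.List.pyRange (i+1) N 1).foldl (fun arr j =>
      if PySem.Int.mod (PySem.List.pyGetD nums j 0) (PySem.List.pyGetD nums i 0) == 0 then
        arr.set j.toNat true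
      else if PySem.Int.mod (PySem.List.pyGetD nums i 0) (PySem.List.pyGetD nums j 0) == 0 then
        arr.set i.toNat true
      else arr) arr) is_divisible
  (PySem.List.pyRange 0 N 1).foldl (fun c i =>
    if !(PySem.List.pyGetD is_divisible i false) then c + 1 else c) 0

-- ===== PORT B =====
def get_min_colors_alt (nums : List Int) : Int :=
  let vals : PySem.Set Int := PySem.Set.ofList (nums.map (fun x => |x|))
  (nums.foldl (fun (st : PySem.Set Int × Int) x =>
      let a := |x|
      if PySem.Set.contains st.1 a then st
      else (PySem.Set.add st.1 a,
        if vals.any (fun d => !(d == 0) && !(d == a) && (PySem.Int.mod a d == 0)) then st.2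
        else st.2 + 1))
    (PySem.Set.empty, 0)).2

-- ===== PRECONDITION & SPEC =====
-- Pre_ excludes exactly the inputs on which the Python A raises ZeroDivisionError:
-- a 0 anywhere before the last position is used as a divisor by the pair loop.
def Pre_get_min_colors (nums : List Int) : Prop := (0 : Int) ∉ nums.dropLast
instance (nums : List Int) : Decidable (Pre_get_min_colors nums) := by unfold Pre_get_min_colors; infer_instance
def pvWitness_get_min_colors : List Int := [2, 3, 4, 9, 6]

def Spec_get_min_colors (nums : List Int) (out : Int) : Prop := out = get_min_colors_alt nums
instance (nums : List Int) (out : Int) : Decidable (Spec_get_min_colors nums out) := by unfold Spec_get_min_colors; infer_instance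

-- ===== CLAIM (what is proved, stated in full; the proofs are below) =====
def Claim_equal_get_min_colors : Prop := ∀ (nums : List Int), Dom_get_min_colors nums → Pre_get_min_colors nums → Spec_get_min_colors nums (get_min_colors nums)
-- ===== LEMMAS AND PROOFS =====

-- shorthand for nums[l] as the ports read it (always used with l < nums.length)
def pvV (nums : List Int) (l : Nat) : Int := nums.getD l 0

-- A's pair-loop body, as a function of the pair (i, j)
def pvStepA (nums : List Int) (arr : List Bool) (p : Int × Int) : List Bool :=
  if PySem.Int.mod (PySem.List.pyGetD nums p.2 0) (PySem.List.pyGetD nums p.1 0) == 0 then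
    arr.set p.2.toNat true
  else if PySem.Int.mod (PySem.List.pyGetD nums p.1 0) (PySem.List.pyGetD nums p.2 0) == 0 then
    arr.set p.1.toNat true
  else arr

-- "processing pair p writes `true` at position k"
def pvHitA (nums : List Int) (p : Int × Int) (k : Nat) : Bool :=
  if PySem.Int.mod (PySem.List.pyGetD nums p.2 0) (PySem.List.pyGetD nums p.1 0) == 0 then
    p.2.toNat == k
  else if PySem.Int.mod (PySem.List.pyGetD nums p.1 0) (PySem.List.pyGetD nums p.2 0) == 0 then
    p.1.toNat == k
  else false

-- the list of index pairs A's nested loops visit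
def pvPairs (nums : List Int) : List (Int × Int) :=
  (PySem.List.pyRange 0 (nums.length : Int) 1).flatMap
    (fun i => (PySem.List.pyRange (i+1) (nums.length : Int) 1).map (fun j => (i, j)))

-- A's marking condition, written over Nat indices
def pvMarked (nums : List Int) (k : Nat) : Prop :=
  (∃ a < k, pvV nums a ∣ pvV nums k) ∨
  (∃ b, k < b ∧ b < nums.length ∧ pvV nums b ∣ pvV nums k ∧ ¬ pvV nums k ∣ pvV nums b)

-- B's divisor test (true = x gets a colour as far as divisors are concerned)
def pvPassB (vals : List Int) (a : Int) : Bool :=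
  !(vals.any (fun d => !(d == 0) && !(d == a) && (PySem.Int.mod a d == 0)))

-- what B counts, as a recursion B's loop computes
def pvGoodCount (vals : List Int) (s : List Int) : List Int → Int
  | [] => 0
  | x :: t =>
    if PySem.Set.contains s |x| then pvGoodCount vals s t
    else (if pvPassB vals |x| then 1 else 0) + pvGoodCount vals (PySem.Set.add s |x|) t

-- the common counting predicate
abbrev pvGood (nums : List Int) (k : Nat) : Prop :=
  (∀ i < k, |pvV nums i| ≠ |pvV nums k|) ∧
  (∀ y ∈ nums, ¬(|y| ≠ 0 ∧ |y| ≠ |pvV nums k| ∧ |y| ∣ |pvV nums k|))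

lemma pv_foldl_nested {α β γ : Type} (l : List α) (g : α → List β) (f : γ → α → β → γ) (init : γ) :
    l.foldl (fun acc i => (g i).foldl (fun a j => f a i j) acc) init
      = (l.flatMap (fun i => (g i).map (fun j => (i, j)))).foldl (fun a p => f a p.1 p.2) init := by
  induction l generalizing init with
  | nil => rfl
  | cons x t ih => simp [List.foldl_append, List.foldl_map, ih]

lemma pvStepA_length (nums : List Int) (arr : List Bool) (p : Int × Int) :
    (pvStepA nums arr p).length = arr.length := by
  unfold pvStepA; split_ifs <;> simp

lemma pv_set_getD (l : List Bool) (m k : Nat) (a : Bool) (h : m < l.length) :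
    (l.set m a).getD k false = if m = k then a else l.getD k false := by
  rcases eq_or_ne m k with rfl|hne
  · simp [List.getD_eq_getElem?_getD, h]
  · simp [List.getD_eq_getElem?_getD, List.getElem?_set_ne hne, hne]

lemma pvStepA_getD (nums : List Int) (arr : List Bool) (p : Int × Int) (k : Nat)
    (h1 : p.1.toNat < arr.length) (h2 : p.2.toNat < arr.length) :
    (pvStepA nums arr p).getD k false = (arr.getD k false || pvHitA nums p k) := by
  unfold pvStepA pvHitA
  split_ifs with hc1 hc2
  · rw [pv_set_getD _ _ _ _ h2]
    rcases eq_or_ne p.2.toNat k with rfl|hne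
    · simp
    · simp [hne]
  · rw [pv_set_getD _ _ _ _ h1]
    rcases eq_or_ne p.1.toNat k with rfl|hne
    · simp
    · simp [hne]
  · simp

lemma pv_foldl_stepA_getD (nums : List Int) (P : List (Int × Int)) (arr : List Bool) (k : Nat)
    (hP : ∀ p ∈ P, p.1.toNat < arr.length ∧ p.2.toNat < arr.length) :
    (P.foldl (pvStepA nums) arr).getD k false
      = (arr.getD k false || P.any (fun p => pvHitA nums p k)) := by
  induction P generalizing arr with
  | nil => simp
  | cons p t ih =>
    have hp := hP p (by simp)
    have hlen := pvStepA_length nums arr p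
    simp only [List.foldl_cons, List.any_cons]
    rw [ih _ (fun q hq => by rw [hlen]; exact hP q (by simp [hq]))]
    rw [pvStepA_getD nums arr p k hp.1 hp.2]
    rw [Bool.or_assoc]

lemma pv_mem_pairs (nums : List Int) (p : Int × Int) :
    p ∈ pvPairs nums ↔ ∃ a b : Nat, a < b ∧ b < nums.length ∧ p = ((a : Int), (b : Int)) := by
  unfold pvPairs
  simp only [List.mem_flatMap, List.mem_map, PySem.List.mem_pyRange_one]
  constructor
  · rintro ⟨i, ⟨hi0, hiN⟩, j, ⟨hj1, hjN⟩, rfl⟩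
    refine ⟨i.toNat, j.toNat, by omega, by omega, ?_⟩
    simp [Int.toNat_of_nonneg hi0, Int.toNat_of_nonneg (by omega : (0:Int) ≤ j)]
  · rintro ⟨a, b, hab, hbN, rfl⟩
    exact ⟨(a : Int), ⟨by positivity, by exact_mod_cast Nat.lt_trans hab hbN⟩,
      (b : Int), ⟨by exact_mod_cast hab, by exact_mod_cast hbN⟩, rfl⟩

lemma pv_any_hit_iff (nums : List Int) (k : Nat) (hk : k < nums.length) :
    (pvPairs nums).any (fun p => pvHitA nums p k) = true ↔ pvMarked nums k := by
  rw [List.any_eq_true]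
  constructor
  · rintro ⟨p, hp, hhit⟩
    rcases (pv_mem_pairs nums p).mp hp with ⟨a, b, hab, hbN, rfl⟩
    unfold pvHitA at hhit
    simp only [PySem.List.pyGetD_natCast, Int.toNat_natCast, beq_iff_eq,
      PySem.Int.mod_eq_zero_iff_dvd] at hhit
    split_ifs at hhit with hc1 hc2
    · have hbk : b = k := by simpa using hhit
      subst hbk
      exact Or.inl ⟨a, hab, hc1⟩
    · have hak : a = k := by simpa using hhit
      subst hak
      exact Or.inr ⟨b, hab, hbN, hc2, hc1⟩
  · rintro (⟨a, hak, hdvd⟩ | ⟨b, hkb, hbN, hdvd, hnd⟩)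
    · refine ⟨((a : Int), (k : Int)), (pv_mem_pairs nums _).mpr ⟨a, k, hak, hk, rfl⟩, ?_⟩
      unfold pvHitA
      simp only [PySem.List.pyGetD_natCast, Int.toNat_natCast, beq_iff_eq,
        PySem.Int.mod_eq_zero_iff_dvd]
      unfold pvV at hdvd
      simp only [List.getD_eq_getElem?_getD] at hdvd
      simp [hdvd]
    · refine ⟨((k : Int), (b : Int)), (pv_mem_pairs nums _).mpr ⟨k, b, hkb, hbN, rfl⟩, ?_⟩
      unfold pvHitA
      simp only [PySem.List.pyGetD_natCast, Int.toNat_natCast, beq_iff_eq,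
        PySem.Int.mod_eq_zero_iff_dvd]
      unfold pvV at hdvd hnd
      simp only [List.getD_eq_getElem?_getD] at hdvd hnd
      simp [hdvd, hnd]

lemma pv_A_eq_countP (nums : List Int) :
    get_min_colors nums
      = ((List.range nums.length).countP
          (fun k => !((pvPairs nums).any (fun p => pvHitA nums p k))) : Int) := by
  simp only [get_min_colors]
  rw [pv_foldl_nested]
  have hfun : (fun (a : List Bool) (p : Int × Int) =>
      if PySem.Int.mod (PySem.List.pyGetD nums p.2 0) (PySem.List.pyGetD nums p.1 0) == 0 then
        a.set p.2.toNat true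
      else if PySem.Int.mod (PySem.List.pyGetD nums p.1 0) (PySem.List.pyGetD nums p.2 0) == 0 then
        a.set p.1.toNat true
      else a) = pvStepA nums := rfl
  rw [hfun]
  have hP : ((PySem.List.pyRange 0 (nums.length : Int) 1).flatMap
      (fun i => (PySem.List.pyRange (i+1) (nums.length : Int) 1).map (fun j => (i, j))))
      = pvPairs nums := rfl
  rw [hP]
  have harr : ∀ k : Nat,
      ((pvPairs nums).foldl (pvStepA nums) (List.replicate nums.length false)).getD k false
        = (pvPairs nums).any (fun p => pvHitA nums p k) := by
    intro k
    rw [pv_foldl_stepA_getD nums _ _ k]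
    · simp
    · intro p hp
      rcases (pv_mem_pairs nums p).mp hp with ⟨a, b, hab, hbN, rfl⟩
      simp only [List.length_replicate, Int.toNat_natCast]
      omega
  rw [PySem.List.pyRange_zero_natCast, List.foldl_map]
  rw [PySem.List.foldl_if_add_one
    (p := fun k : Nat => !(PySem.List.pyGetD ((pvPairs nums).foldl (pvStepA nums) (List.replicate nums.length false)) (↑k) false))]
  rw [zero_add]
  congr 1
  apply List.countP_congr
  intro k _
  rw [PySem.List.pyGetD_natCast, harr k]

lemma pv_marked_iff_not_good (nums : List Int) (hpre : Pre_get_min_colors nums)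
    (k : Nat) (hk : k < nums.length) :
    pvMarked nums k ↔ ¬ pvGood nums k := by
  have hz : ∀ l : Nat, l + 1 < nums.length → pvV nums l ≠ 0 := by
    intro l hl h0
    apply hpre
    refine List.mem_iff_getElem.mpr ⟨l, by rw [List.length_dropLast]; omega, ?_⟩
    rw [List.getElem_dropLast]
    rw [← List.getD_eq_getElem nums 0 (by omega)]
    exact h0
  have habs : ∀ x y : Int, (|x| ∣ |y|) ↔ x ∣ y := fun x y => by rw [abs_dvd, dvd_abs]
  have hmem : ∀ l : Nat, l < nums.length → pvV nums l ∈ nums := by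
    intro l hl
    rw [pvV, List.getD_eq_getElem nums 0 hl]
    exact List.getElem_mem hl
  constructor
  · rintro (⟨a, hak, hdvd⟩ | ⟨b, hkb, hbN, hdvd, hnd⟩) ⟨h1, h2⟩
    · rcases eq_or_ne |pvV nums a| |pvV nums k| with he|hne
      · exact h1 a hak he
      · exact h2 (pvV nums a) (hmem a (by omega))
          ⟨abs_ne_zero.mpr (hz a (by omega)), hne, (habs _ _).mpr hdvd⟩
    · have hb0 : pvV nums b ≠ 0 := by
        intro h0
        rw [h0, zero_dvd_iff] at hdvd
        exact hnd (by rw [hdvd, h0])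
      have hne : |pvV nums b| ≠ |pvV nums k| := by
        intro he
        exact hnd ((habs _ _).mp (he ▸ dvd_refl _))
      exact h2 (pvV nums b) (hmem b hbN) ⟨abs_ne_zero.mpr hb0, hne, (habs _ _).mpr hdvd⟩
  · intro hng
    rw [not_and_or] at hng
    rcases hng with h1 | h2
    · push Not at h1
      rcases h1 with ⟨i, hik, he⟩
      exact Or.inl ⟨i, hik, (habs _ _).mp (he ▸ dvd_refl _)⟩
    · push Not at h2
      rcases h2 with ⟨y, hy, hy0, hyne, hydvd⟩
      rcases List.mem_iff_getElem.mp hy with ⟨l, hl, hle⟩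
      have hvl : pvV nums l = y := by rw [pvV, List.getD_eq_getElem nums 0 hl]; exact hle
      subst hvl
      rcases lt_trichotomy l k with hlk | hlk | hlk
      · exact Or.inl ⟨l, hlk, (habs _ _).mp hydvd⟩
      · exact absurd (by rw [hlk]) hyne
      · refine Or.inr ⟨l, hlk, hl, (habs _ _).mp hydvd, ?_⟩
        intro hkd
        exact hyne (Int.dvd_antisymm (abs_nonneg _) (abs_nonneg _) hydvd ((habs _ _).mpr hkd))

lemma pv_B_fold (vals : List Int) (l : List Int) (s : List Int) (c : Int) :
    (l.foldl (fun (st : PySem.Set Int × Int) x =>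
      if PySem.Set.contains st.1 |x| then st
      else (PySem.Set.add st.1 |x|,
        if vals.any (fun d => !(d == 0) && !(d == |x|) && (PySem.Int.mod |x| d == 0)) then st.2
        else st.2 + 1)) (s, c)).2 = c + pvGoodCount vals s l := by
  induction l generalizing s c with
  | nil => simp [pvGoodCount]
  | cons x t ih =>
    simp only [List.foldl_cons, pvGoodCount]
    by_cases hc : PySem.Set.contains s |x| = true
    · rw [if_pos hc, if_pos hc, ih]
    · rw [if_neg hc, if_neg hc, ih]
      unfold pvPassB
      cases hA : (vals.any (fun d => !(d == 0) && !(d == |x|) && (PySem.Int.mod |x| d == 0)))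
      · simp
        ring
      · simp

lemma pv_goodCount_countP (vals : List Int) (l : List Int) (s : List Int) :
    pvGoodCount vals s l
      = ((List.range l.length).countP
          (fun k => decide ((∀ i < k, |pvV l i| ≠ |pvV l k|) ∧ |pvV l k| ∉ s) && pvPassB vals |pvV l k|) : Int) := by
  induction l generalizing s with
  | nil => simp [pvGoodCount]
  | cons x t ih =>
    have hv0 : pvV (x :: t) 0 = x := rfl
    have hvs : ∀ k : Nat, pvV (x :: t) (k + 1) = pvV t k := by intro k; simp [pvV]
    have hrange : List.range (x :: t).length = 0 :: (List.range t.length).map Nat.succ := by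
      rw [List.length_cons, List.range_succ_eq_map]
    rw [hrange, List.countP_cons, List.countP_map]
    by_cases hc : PySem.Set.contains s |x| = true
    · have hxs : |x| ∈ s := (PySem.Set.contains_iff _ _).mp hc
      have hcong : ((fun k => decide ((∀ i < k, |pvV (x :: t) i| ≠ |pvV (x :: t) k|) ∧ |pvV (x :: t) k| ∉ s)
              && pvPassB vals |pvV (x :: t) k|) ∘ Nat.succ)
          = (fun k => decide ((∀ i < k, |pvV t i| ≠ |pvV t k|) ∧ |pvV t k| ∉ s) && pvPassB vals |pvV t k|) := by
        funext k
        simp only [Function.comp_apply, hvs k]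
        congr 1
        rw [decide_eq_decide]
        constructor
        · rintro ⟨hall, hns⟩
          exact ⟨fun i hi => by have := hall (i+1) (by omega); rwa [hvs i] at this, hns⟩
        · rintro ⟨hall, hns⟩
          refine ⟨?_, hns⟩
          intro i hi
          cases i with
          | zero => rw [hv0]; intro he; exact hns (he ▸ hxs)
          | succ i => rw [hvs i]; exact hall i (by omega)
      rw [hcong]
      have hp0 : (decide ((∀ i : Nat, i < 0 → |pvV (x :: t) i| ≠ |pvV (x :: t) 0|) ∧ |pvV (x :: t) 0| ∉ s)
          && pvPassB vals |pvV (x :: t) 0|) = false := by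
        simp [hv0, hxs]
      rw [hp0, pvGoodCount, if_pos hc, ih]
      simp
    · have hxs : |x| ∉ s := fun h => hc ((PySem.Set.contains_iff _ _).mpr h)
      have hcong : ((fun k => decide ((∀ i < k, |pvV (x :: t) i| ≠ |pvV (x :: t) k|) ∧ |pvV (x :: t) k| ∉ s)
              && pvPassB vals |pvV (x :: t) k|) ∘ Nat.succ)
          = (fun k => decide ((∀ i < k, |pvV t i| ≠ |pvV t k|) ∧ |pvV t k| ∉ PySem.Set.add s |x|)
              && pvPassB vals |pvV t k|) := by
        funext k
        simp only [Function.comp_apply, hvs k]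
        congr 1
        rw [decide_eq_decide]
        rw [PySem.Set.mem_add]
        constructor
        · rintro ⟨hall, hns⟩
          refine ⟨fun i hi => by have := hall (i+1) (by omega); rwa [hvs i] at this, ?_⟩
          rintro (h | h)
          · exact hns h
          · exact hall 0 (by omega) (by rw [hv0, h])
        · rintro ⟨hall, hns⟩
          refine ⟨?_, fun h => hns (Or.inl h)⟩
          intro i hi
          cases i with
          | zero => rw [hv0]; intro he; exact hns (Or.inr he.symm)
          | succ i => rw [hvs i]; exact hall i (by omega)
      rw [hcong]
      have hp0 : (decide ((∀ i : Nat, i < 0 → |pvV (x :: t) i| ≠ |pvV (x :: t) 0|) ∧ |pvV (x :: t) 0| ∉ s)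
          && pvPassB vals |pvV (x :: t) 0|) = pvPassB vals |x| := by
        simp [hv0, hxs]
      rw [hp0, pvGoodCount, if_neg hc, ih]
      cases hp : pvPassB vals |x|
      · simp
      · simp
        ring

lemma pv_B_eq_countP (nums : List Int) :
    get_min_colors_alt nums
      = ((List.range nums.length).countP (fun k => decide (pvGood nums k)) : Int) := by
  simp only [get_min_colors_alt]
  have hfun : (fun (st : PySem.Set Int × Int) (x : Int) =>
      let a := |x|
      if PySem.Set.contains st.1 a then st
      else (PySem.Set.add st.1 a,
        if (PySem.Set.ofList (nums.map (fun x => |x|))).any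
            (fun d => !(d == 0) && !(d == a) && (PySem.Int.mod a d == 0)) then st.2
        else st.2 + 1))
      = (fun (st : PySem.Set Int × Int) x =>
      if PySem.Set.contains st.1 |x| then st
      else (PySem.Set.add st.1 |x|,
        if (PySem.Set.ofList (nums.map (fun x => |x|))).any
            (fun d => !(d == 0) && !(d == |x|) && (PySem.Int.mod |x| d == 0)) then st.2
        else st.2 + 1)) := rfl
  rw [hfun, pv_B_fold, pv_goodCount_countP, zero_add]
  congr 1
  apply List.countP_congr
  intro k hk
  have hkn : k < nums.length := List.mem_range.mp hk
  have hpass : pvPassB (PySem.Set.ofList (nums.map (fun x => |x|))) |pvV nums k| = true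
      ↔ ∀ y ∈ nums, ¬(|y| ≠ 0 ∧ |y| ≠ |pvV nums k| ∧ |y| ∣ |pvV nums k|) := by
    unfold pvPassB
    rw [Bool.not_eq_eq_eq_not, Bool.not_true, List.any_eq_false]
    constructor
    · rintro h y hy ⟨hy0, hyne, hydvd⟩
      have hmem : |y| ∈ PySem.Set.ofList (nums.map (fun x => |x|)) :=
        (PySem.Set.mem_ofList _ _).mpr (List.mem_map.mpr ⟨y, hy, rfl⟩)
      have h2 := h _ hmem
      have h3 : (!(|y| == 0) && !(|y| == |pvV nums k|) && (PySem.Int.mod |pvV nums k| |y| == 0)) = true := by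
        rw [Bool.and_eq_true, Bool.and_eq_true]
        refine ⟨⟨?_, ?_⟩, ?_⟩
        · simpa using hy0
        · simpa using hyne
        · rw [beq_iff_eq, PySem.Int.mod_eq_zero_iff_dvd]; exact hydvd
      exact h2 h3
    · intro h d hd
      rcases List.mem_map.mp ((PySem.Set.mem_ofList _ _).mp hd) with ⟨y, hy, hdy⟩
      subst hdy
      have h3 := h y hy
      simp only [not_and_or, not_not] at h3
      rcases h3 with h0 | hne | hnd
      · simp [h0]
      · simp [hne]
      · rw [abs_dvd, dvd_abs] at hnd
        simp [PySem.Int.mod_eq_zero_iff_dvd, abs_dvd, dvd_abs, hnd]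
  constructor
  · intro hL
    rw [Bool.and_eq_true] at hL
    exact decide_eq_true ⟨(of_decide_eq_true hL.1).1, hpass.mp hL.2⟩
  · intro hR
    have hg := of_decide_eq_true hR
    rw [Bool.and_eq_true]
    exact ⟨decide_eq_true ⟨hg.1, by simp [PySem.Set.empty]⟩, hpass.mpr hg.2⟩

-- ===== VERDICT (by name: the statement is the Claim_ definition above) =====
theorem get_min_colors_spec : Claim_equal_get_min_colors := by
  intro nums _ hpre
  unfold Spec_get_min_colors
  rw [pv_A_eq_countP, pv_B_eq_countP]
  congr 1
  apply List.countP_congr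
  intro k hk
  have hkn : k < nums.length := List.mem_range.mp hk
  have ha := pv_any_hit_iff nums k hkn
  have hmg := pv_marked_iff_not_good nums hpre k hkn
  constructor
  · intro hL
    rw [Bool.not_eq_true'] at hL
    have hnm : ¬ pvMarked nums k := fun hm => (by simpa using (ha.mpr hm).symm.trans hL : False)
    exact decide_eq_true (not_not.mp (fun hng => hnm (hmg.mpr hng)))
  · intro hR
    rw [Bool.not_eq_true', ← Bool.not_eq_true]
    exact fun h => (hmg.mp (ha.mp h)) (of_decide_eq_true hR)
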